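-- pv_equiv track=rewrite | github.com/echogwu/hackerrank | repeated_string/main.py | number_of_a_by_index
-- ===== SOURCE A (Python) =====
-- def number_of_a_by_index(s, end_index):
--     total_a_counter, indexed_a_counter = 0, 0
--     index = 0
--     for x in iter(s):
--         index += 1
--         if x == "a":
--             total_a_counter += 1
--             if index <= end_index:
--                 indexed_a_counter += 1
--     return total_a_counter, indexed_a_counter
-- ===== SOURCE B (Python) =====
-- def number_of_a_by_index(s, end_index):
--     total = sum(ch == "a" for ch in s)
--     indexed = sum(ch == "a" for ch in s[:max(end_index, 0)])
--     return total, indexed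
-- ===== Notes on version B (the rewrite author's own statement) =====
-- stated objective: simpler
-- what changed: Replaces the fused single loop maintaining three counters with two independent comprehension-sums, one over the whole string and one over the slice s[:max(end_index,0)].
import Mathlib
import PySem

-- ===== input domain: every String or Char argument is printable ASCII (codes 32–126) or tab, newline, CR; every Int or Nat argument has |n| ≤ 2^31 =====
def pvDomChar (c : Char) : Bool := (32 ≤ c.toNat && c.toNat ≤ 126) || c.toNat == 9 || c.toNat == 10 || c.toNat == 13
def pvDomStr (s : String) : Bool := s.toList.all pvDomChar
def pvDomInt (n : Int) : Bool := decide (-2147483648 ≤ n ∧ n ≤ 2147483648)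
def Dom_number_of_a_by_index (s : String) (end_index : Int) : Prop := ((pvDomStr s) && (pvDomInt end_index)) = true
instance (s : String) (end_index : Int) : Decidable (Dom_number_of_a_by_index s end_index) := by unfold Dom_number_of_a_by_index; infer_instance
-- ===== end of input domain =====

-- B replaces A's single fused loop (three counters) by two independent comprehension-sums,
-- one over the whole string and one over the slice s[:max(end_index, 0)] (objective: simpler).

-- ===== PORT A =====
-- fused loop: state (total_a_counter, indexed_a_counter, index)
def number_of_a_by_index (s : String) (end_index : Int) : Int × Int :=
  let st := s.toList.foldl (fun (st : Int × Int × Int) x =>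
    let index := st.2.2 + 1
    if x == 'a' then
      (st.1 + 1, (if index ≤ end_index then st.2.1 + 1 else st.2.1), index)
    else
      (st.1, st.2.1, index)) (0, 0, 0)
  (st.1, st.2.1)

-- ===== PORT B =====
-- sum(ch == "a" for ch in …) ported as the sum of the 0/1 map; s[:max(end_index,0)] via PySem slice
def number_of_a_by_index_alt (s : String) (end_index : Int) : Int × Int :=
  let total := (s.toList.map (fun ch => if ch == 'a' then (1 : Int) else 0)).sum
  let indexed := ((PySem.List.slice s.toList none (some (max end_index 0))).map
    (fun ch => if ch == 'a' then (1 : Int) else 0)).sum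
  (total, indexed)

-- ===== PRECONDITION & SPEC =====
def Spec_number_of_a_by_index (s : String) (end_index : Int) (out : Int × Int) : Prop := out = number_of_a_by_index_alt s end_index
instance (s : String) (end_index : Int) (out : Int × Int) : Decidable (Spec_number_of_a_by_index s end_index out) := by unfold Spec_number_of_a_by_index; infer_instance

-- ===== CLAIM (what is proved, stated in full; the proofs are below) =====
def Claim_equal_number_of_a_by_index : Prop := ∀ (s : String) (end_index : Int), Dom_number_of_a_by_index s end_index → Spec_number_of_a_by_index s end_index (number_of_a_by_index s end_index)

-- ===== LEMMAS AND PROOFS =====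

-- characterisation of A's fold: total gains count 'a', indexed gains count 'a' among the
-- first (e - idx) characters (1-based positions ≤ e), index advances by the length
theorem numA_loop (e : Int) (cs : List Char) : ∀ (t i idx : Int),
    cs.foldl (fun (st : Int × Int × Int) x =>
      let index := st.2.2 + 1
      if x == 'a' then
        (st.1 + 1, (if index ≤ e then st.2.1 + 1 else st.2.1), index)
      else
        (st.1, st.2.1, index)) (t, i, idx)
    = (t + (cs.count 'a' : Int),
       i + ((cs.take (e - idx).toNat).count 'a' : Int),
       idx + cs.length) := by
  induction cs with
  | nil => intro t i idx; simp
  | cons c cs ih =>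
    intro t i idx
    simp only [List.foldl_cons]
    by_cases hc : c = 'a'
    · subst hc
      simp only [beq_self_eq_true, if_pos]
      rw [ih]
      by_cases he : idx + 1 ≤ e
      · have h1 : (e - idx).toNat = (e - (idx + 1)).toNat + 1 := by omega
        rw [if_pos he, h1]
        simp
        constructor
        · ring
        · omega
      · have h0 : (e - idx).toNat = 0 := by omega
        have h0' : (e - (idx + 1)).toNat = 0 := by omega
        rw [if_neg he, h0, h0']
        simp
        constructor
        · ring
        · omega
    · have hb : (c == 'a') = false := by simp [hc]
      rw [hb]
      simp only [if_neg Bool.false_ne_true]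
      rw [ih]
      have hcnt : ∀ k : Nat, ((c :: cs).take k).count 'a' = (cs.take (k - 1)).count 'a' := by
        intro k
        cases k with
        | zero => simp
        | succ n => simp [hc]
      have h2 : (e - (idx + 1)).toNat = (e - idx).toNat - 1 := by omega
      rw [h2, ← hcnt]
      simp [hc]
      omega

theorem number_of_a_by_index_spec : Claim_equal_number_of_a_by_index := by
  intro s e _
  unfold Spec_number_of_a_by_index number_of_a_by_index number_of_a_by_index_alt
  rw [numA_loop e s.toList 0 0 0]
  have hmax : (0 : Int) ≤ max e 0 := le_max_right _ _
  rw [PySem.List.slice_to _ hmax]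
  have htn : (max e 0).toNat = (e - 0).toNat := by omega
  rw [htn, PySem.List.sum_map_ite_one_zero (fun ch => ch == 'a') s.toList,
      PySem.List.sum_map_ite_one_zero (fun ch => ch == 'a') (s.toList.take (e - 0).toNat)]
  simp [List.count]
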